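-- pv_equiv track=rewrite | github.com/MrBrantCode/unitest_baseline | mut_generate/mist_train_taco/taco_18345/solution.py | maximize_xor_count
-- ===== SOURCE A (Python) =====
-- def maximize_xor_count(X: int) -> int:
--     ans = 0
--     k = 1
--     while X:
--         if X & 1 == 0:
--             ans += k
--         X >>= 1
--         k <<= 1
--     return ans
-- ===== SOURCE B (Python) =====
-- def maximize_xor_count(X: int) -> int:
--     return ((1 << X.bit_length()) - 1) ^ X
-- ===== Notes on version B (the rewrite author's own statement) =====
-- stated objective: simpler
-- what changed: Replaced A's bit-by-bit loop with a closed-form expression: XOR X against the all-ones mask of X.bit_length() bits, which flips exactly the zero bits below the highest set bit.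
import Mathlib
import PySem

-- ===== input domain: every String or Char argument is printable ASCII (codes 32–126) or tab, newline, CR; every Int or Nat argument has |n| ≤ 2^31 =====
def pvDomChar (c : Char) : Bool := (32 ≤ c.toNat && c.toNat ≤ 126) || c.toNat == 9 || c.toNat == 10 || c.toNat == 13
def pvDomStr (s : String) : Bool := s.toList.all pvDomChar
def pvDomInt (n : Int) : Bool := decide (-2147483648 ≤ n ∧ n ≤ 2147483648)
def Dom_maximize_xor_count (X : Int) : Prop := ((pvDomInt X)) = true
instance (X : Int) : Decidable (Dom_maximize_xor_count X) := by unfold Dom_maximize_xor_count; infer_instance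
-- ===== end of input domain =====

-- B replaces A's bit-by-bit accumulation loop with the closed form ((1 << X.bit_length()) - 1) ^ X (objective: simpler).
-- Pre_ excludes negative X, on which Python A's `while X` loop never terminates.

-- ===== PORT A =====
-- A's while-loop: state (X, ans, k); `X >>= 1` on the nonnegative X admitted by Pre_ is division by 2.
-- On negative X Python A diverges (excluded by Pre_); the port recurses on X.toNat.
def pvLoopA (n : Nat) (ans k : Int) : Int :=
  if n = 0 then ans
  else pvLoopA (n / 2) (if n % 2 == 0 then ans + k else ans) (Int.shiftLeft k 1)
termination_by n
decreasing_by exact Nat.div_lt_self (Nat.pos_of_ne_zero ‹n ≠ 0›) (by norm_num)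

def maximize_xor_count (X : Int) : Int := pvLoopA X.toNat 0 1

-- ===== PORT B =====
-- int.bit_length() (Python takes the absolute value's bit length)
def pvBitLength (n : Nat) : Nat :=
  if n = 0 then 0
  else pvBitLength (n / 2) + 1
decreasing_by exact Nat.div_lt_self (Nat.pos_of_ne_zero ‹n ≠ 0›) (by norm_num)

def maximize_xor_count_alt (X : Int) : Int :=
  Int.xor (Int.shiftLeft 1 (pvBitLength X.natAbs) - 1) X

-- ===== PRECONDITION & SPEC =====
-- Pre_ excludes negative X: there Python A loops forever (`while X` with X >>= 1 stuck at -1), so A never returns.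
def Pre_maximize_xor_count (X : Int) : Prop := 0 ≤ X
instance (X : Int) : Decidable (Pre_maximize_xor_count X) := by unfold Pre_maximize_xor_count; infer_instance
def pvWitness_maximize_xor_count : Int := (5)

def Spec_maximize_xor_count (X : Int) (out : Int) : Prop := out = maximize_xor_count_alt X
instance (X : Int) (out : Int) : Decidable (Spec_maximize_xor_count X out) := by unfold Spec_maximize_xor_count; infer_instance

-- ===== CLAIM (what is proved, stated in full; the proofs are below) =====
def Claim_equal_maximize_xor_count : Prop := ∀ (X : Int), Dom_maximize_xor_count X → Pre_maximize_xor_count X → Spec_maximize_xor_count X (maximize_xor_count X)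

-- ===== LEMMAS AND PROOFS =====

lemma pvBitLength_lt (n : Nat) : n < 2 ^ pvBitLength n := by
  induction n using Nat.strong_induction_on with
  | _ n ih =>
    rw [pvBitLength]
    by_cases h : n = 0
    · simp [h]
    · simp only [h, if_false, pow_succ]
      have := ih (n / 2) (Nat.div_lt_self (Nat.pos_of_ne_zero h) (by norm_num))
      omega

-- XOR against the all-ones mask of b bits is subtraction from that mask.
lemma mask_xor (b n : Nat) (h : n < 2 ^ b) : (2 ^ b - 1) ^^^ n = 2 ^ b - 1 - n := by
  induction b generalizing n with
  | zero => interval_cases n; decide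
  | succ b ih =>
    have hq : n / 2 < 2 ^ b := by
      have : n < 2 * 2 ^ b := by rw [pow_succ] at h; omega
      omega
    have hx : ((2 ^ (b + 1) - 1) ^^^ n) = 2 * (((2 ^ (b + 1) - 1) / 2) ^^^ (n / 2)) + ((2 ^ (b + 1) - 1) ^^^ n) % 2 := by
      rw [← Nat.xor_div_two]; omega
    have hdiv : (2 ^ (b + 1) - 1) / 2 = 2 ^ b - 1 := by
      rw [pow_succ]; omega
    have hmod : ((2 ^ (b + 1) - 1) ^^^ n) % 2 = ((2 ^ (b + 1) - 1) + n) % 2 := Nat.xor_mod_two_eq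
    have h1 : (2 ^ (b + 1) - 1) % 2 = 1 := by rw [pow_succ]; omega
    rw [hx, hdiv, ih (n / 2) hq]
    have h2b : 1 ≤ 2 ^ b := Nat.one_le_two_pow
    rw [pow_succ] at *
    omega

-- Loop invariant of A: pvLoopA n ans k = ans + k * ((2^bitlen n - 1) - n).
lemma pvLoopA_eq (n : Nat) : ∀ (ans k : Int),
    pvLoopA n ans k = ans + k * ((2 ^ pvBitLength n : Int) - 1 - (n : Int)) := by
  induction n using Nat.strong_induction_on with
  | _ n ih =>
    intro ans k
    rw [pvLoopA.eq_def, pvBitLength.eq_def]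
    by_cases h : n = 0
    · simp [h]
    · simp only [h, if_false]
      rw [ih (n / 2) (Nat.div_lt_self (Nat.pos_of_ne_zero h) (by norm_num))]
      have hn : (n : Int) = 2 * ((n / 2 : Nat) : Int) + ((n % 2 : Nat) : Int) := by
        push_cast; omega
      have hk : Int.shiftLeft k 1 = 2 * k := by
        rw [show Int.shiftLeft k 1 = k * 2 ^ 1 from Int.shiftLeft_eq k 1]; ring
      rcases Nat.mod_two_eq_zero_or_one n with hm | hm <;>
        simp only [hm, hk, beq_iff_eq, pow_succ] <;>
        · rw [hn, hm]; push_cast; ring_nf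

theorem maximize_xor_count_spec : Claim_equal_maximize_xor_count := by
  intro X _ hpre
  unfold Spec_maximize_xor_count maximize_xor_count maximize_xor_count_alt
  obtain ⟨n, rfl⟩ : ∃ n : Nat, X = (n : Int) := ⟨X.toNat, (Int.toNat_of_nonneg hpre).symm⟩
  rw [Int.toNat_natCast, Int.natAbs_natCast, pvLoopA_eq]
  have hlt := pvBitLength_lt n
  have hshift : Int.shiftLeft (1 : Int) (pvBitLength n) = ((2 ^ pvBitLength n : Nat) : Int) := by
    show Int.ofNat (1 <<< pvBitLength n) = _
    simp [Nat.shiftLeft_eq]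
  rw [hshift]
  have hsub : ((2 ^ pvBitLength n : Nat) : Int) - 1 = (((2 ^ pvBitLength n - 1 : Nat)) : Int) := by
    push_cast [Nat.one_le_two_pow]; ring
  rw [hsub]
  show (0 : Int) + 1 * _ = Int.xor (Int.ofNat _) (Int.ofNat n)
  have : Int.xor (Int.ofNat (2 ^ pvBitLength n - 1)) (Int.ofNat n) = Int.ofNat ((2 ^ pvBitLength n - 1) ^^^ n) := rfl
  rw [this, mask_xor _ _ hlt]
  have h1 : 1 ≤ 2 ^ pvBitLength n := Nat.one_le_two_pow
  have h2 : n ≤ 2 ^ pvBitLength n - 1 := by omega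
  rw [Int.ofNat_eq_natCast, Nat.cast_sub h2, Nat.cast_sub h1]
  push_cast
  ring
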